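-- pv_equiv track=rewrite | github.com/DooDoo3804/Study | coding_test/Python/Programmers/12951_JadenCase문자열만들기.py | solution
-- ===== SOURCE A (Python) =====
-- def solution(s):
--     answer = ''
--
--     for ss in s:
--         if answer == '':
--             answer += ss.upper()
--         else:
--             if answer[-1] == " ":
--                 answer += ss.upper()
--             else:
--                 answer += ss.lower()
--     return answer
-- ===== SOURCE B (Python) =====
-- def solution(s):
--     return ' '.join(w.capitalize() for w in s.split(' '))
-- ===== Notes on version B (the rewrite author's own statement) =====
-- stated objective: faster
-- what changed: Replaces A's character-by-character scan with quadratic string concatenation (tracking the last emitted character) by a word-based pass: split on single spaces, capitalize each token, rejoin with spaces.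
import Mathlib
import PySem

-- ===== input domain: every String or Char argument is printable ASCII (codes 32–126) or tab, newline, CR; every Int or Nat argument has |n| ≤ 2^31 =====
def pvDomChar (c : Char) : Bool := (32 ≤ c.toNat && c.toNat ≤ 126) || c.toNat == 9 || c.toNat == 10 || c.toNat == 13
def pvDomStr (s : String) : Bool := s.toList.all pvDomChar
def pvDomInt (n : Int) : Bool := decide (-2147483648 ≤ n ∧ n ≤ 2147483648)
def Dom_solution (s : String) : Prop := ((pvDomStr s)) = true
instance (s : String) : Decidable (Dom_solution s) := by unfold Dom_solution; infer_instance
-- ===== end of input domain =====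

-- B replaces A's character scan (tracking the last emitted character) by split(' ') / capitalize / join(' '); equivalence of the return values is proved.

-- ===== PORT A =====
-- literal port of A: build `answer` char by char, branching on empty / last char a space
def solution (s : String) : String :=
  String.ofList (s.toList.foldl
    (fun answer ss =>
      if answer = [] then answer ++ [PySem.Chars.upperChar ss]
      else if PySem.List.pyGetD answer (-1) ' ' = ' ' then answer ++ [PySem.Chars.upperChar ss]
      else answer ++ [PySem.Chars.lowerChar ss]) [])

-- ===== PORT B =====
-- str.capitalize (exact on ASCII): upper-case the first character, lower-case the rest
def pyCapitalize (w : List Char) : List Char :=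
  match w with
  | [] => []
  | c :: cs => PySem.Chars.upperChar c :: PySem.Chars.lower cs

def solution_alt (s : String) : String :=
  String.ofList (PySem.Chars.join [' '] ((PySem.Chars.splitOn s.toList [' ']).map pyCapitalize))

-- ===== PRECONDITION & SPEC =====
def Spec_solution (s : String) (out : String) : Prop := out = solution_alt s
instance (s : String) (out : String) : Decidable (Spec_solution s out) := by unfold Spec_solution; infer_instance

-- ===== CLAIM (what is proved, stated in full; the proofs are below) =====
def Claim_equal_solution : Prop := ∀ (s : String), Dom_solution s → Spec_solution s (solution s)

-- ===== LEMMAS AND PROOFS =====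

-- upper/lower of a char is a space exactly when the char is a space
theorem upperChar_space_iff (c : Char) : (PySem.Chars.upperChar c = ' ') ↔ c = ' ' := by
  unfold PySem.Chars.upperChar PySem.Chars.islower
  constructor
  · intro h
    by_contra hne
    split at h
    · next hl =>
      simp at hl
      have hb : 97 ≤ c.toNat ∧ c.toNat ≤ 122 := by
        constructor <;> [exact hl.1; exact hl.2]
      have hv : (c.toNat - 32).isValidChar := Or.inl (by omega)
      have : (Char.ofNat (c.toNat - 32)).toNat = 32 := by rw [h]; decide
      rw [Char.toNat_ofNat, if_pos hv] at this
      omega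
    · exact hne h
  · intro h; subst h; decide

theorem lowerChar_space_iff (c : Char) : (PySem.Chars.lowerChar c = ' ') ↔ c = ' ' := by
  unfold PySem.Chars.lowerChar PySem.Chars.isupper
  constructor
  · intro h
    by_contra hne
    split at h
    · next hl =>
      simp at hl
      have hb : 65 ≤ c.toNat ∧ c.toNat ≤ 90 := by
        constructor <;> [exact hl.1; exact hl.2]
      have hv : (c.toNat + 32).isValidChar := Or.inl (by omega)
      have : (Char.ofNat (c.toNat + 32)).toNat = 32 := by rw [h]; decide
      rw [Char.toNat_ofNat, if_pos hv] at this
      omega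
    · exact hne h
  · intro h; subst h; decide

-- the common specification both programs compute: JadenCase with a pending "upper next?" flag
def jadenGo : Bool → List Char → List Char
  | _, [] => []
  | up, c :: cs =>
      (if up then PySem.Chars.upperChar c else PySem.Chars.lowerChar c) :: jadenGo (c == ' ') cs

theorem jadenGo_cons (up : Bool) (c : Char) (cs : List Char) :
    jadenGo up (c :: cs)
      = (if up then PySem.Chars.upperChar c else PySem.Chars.lowerChar c) :: jadenGo (c == ' ') cs := rfl

-- structural split on a single space (proof-side model of splitOn s [' '])
def sp : List Char → List (List Char)
  | [] => [[]]
  | c :: cs => if c = ' ' then [] :: sp cs else (c :: (sp cs).headI) :: (sp cs).tail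

theorem sp_ne_nil (cs : List Char) : sp cs ≠ [] := by
  cases cs with
  | nil => simp [sp]
  | cons c cs => simp only [sp]; split <;> simp

theorem sp_cons_exists (cs : List Char) : ∃ w ws, sp cs = w :: ws := by
  cases hsp : sp cs with
  | nil => exact absurd hsp (sp_ne_nil cs)
  | cons w ws => exact ⟨w, ws, rfl⟩

theorem go_eq (fuel : Nat) (l cur : List Char) (acc : List (List Char)) (h : l.length < fuel) :
    PySem.Chars.splitOn.go [' '] fuel l cur acc =
      (acc.reverse ++ ((cur.reverse ++ (sp l).headI) :: (sp l).tail) : List (List Char)) := by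
  induction fuel generalizing l cur acc with
  | zero => omega
  | succ fuel ih =>
    cases l with
    | nil => simp [PySem.Chars.splitOn.go, sp]
    | cons c rest =>
      have hlen : rest.length < fuel := by simp at h; omega
      by_cases hc : c = ' '
      · subst hc
        have hpre : ([' '].isPrefixOf (' ' :: rest)) = true := by simp [List.isPrefixOf]
        simp only [PySem.Chars.splitOn.go, hpre]
        rw [show List.drop [' '].length (' ' :: rest) = rest from rfl]
        rw [ih rest [] (cur.reverse :: acc) hlen]
        obtain ⟨w, ws, hw⟩ := sp_cons_exists rest
        simp [sp, hw]
      · have hpre : ([' '].isPrefixOf (c :: rest)) = false := by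
          simp [List.isPrefixOf, Ne.symm hc]
        simp only [PySem.Chars.splitOn.go, hpre]
        rw [if_neg (by simp)]
        rw [ih rest (c :: cur) acc hlen]
        simp [sp, hc]

theorem splitOn_eq_sp (cs : List Char) : PySem.Chars.splitOn cs [' '] = sp cs := by
  unfold PySem.Chars.splitOn
  rw [go_eq _ _ _ _ (by omega)]
  obtain ⟨w, ws, hw⟩ := sp_cons_exists cs
  simp [hw]

-- ' '.join(x :: xs) in closed form
theorem join_cons (x : List Char) (xs : List (List Char)) :
    PySem.Chars.join [' '] (x :: xs) = x ++ (xs.map (fun y => ' ' :: y)).flatten := by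
  induction xs generalizing x with
  | nil => simp [PySem.Chars.join, List.intercalate]
  | cons y ys ih =>
    have := ih y
    simp only [PySem.Chars.join, List.intercalate] at this ⊢
    simp [List.intersperse, this]

theorem cap_nil : pyCapitalize [] = [] := rfl
theorem cap_cons (a : Char) (l : List Char) :
    pyCapitalize (a :: l) = PySem.Chars.upperChar a :: PySem.Chars.lower l := rfl
theorem upper_space : PySem.Chars.upperChar ' ' = ' ' := by decide
theorem lower_space : PySem.Chars.lowerChar ' ' = ' ' := by decide

-- the heart: capitalize-the-head (resp. lower-the-head) of the split, joined back, is jadenGo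
theorem sp_join (cs : List Char) :
    pyCapitalize (sp cs).headI ++ (((sp cs).tail).map (fun y => ' ' :: pyCapitalize y)).flatten
        = jadenGo true cs
    ∧ PySem.Chars.lower (sp cs).headI ++ (((sp cs).tail).map (fun y => ' ' :: pyCapitalize y)).flatten
        = jadenGo false cs := by
  induction cs with
  | nil => simp [sp, pyCapitalize, PySem.Chars.lower, jadenGo]
  | cons c cs ih =>
    obtain ⟨w, ws, hw⟩ := sp_cons_exists cs
    rw [hw] at ih
    simp only [List.headI, List.tail] at ih
    by_cases hc : c = ' '
    · subst hc
      have hsp : sp (' ' :: cs) = [] :: w :: ws := by simp [sp, hw]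
      rw [hsp]
      simp only [List.headI, List.tail, cap_nil, List.map_cons, List.flatten_cons,
        List.nil_append, List.cons_append]
      rw [ih.1, show PySem.Chars.lower ([] : List Char) = [] from rfl,
        jadenGo_cons true, jadenGo_cons false, upper_space, lower_space]
      simp
    · have hcb : (c == ' ') = false := by simp [hc]
      have hsp : sp (c :: cs) = (c :: w) :: ws := by simp [sp, hw, hc]
      rw [hsp]
      simp only [List.headI, List.tail, cap_cons, List.cons_append]
      have hlc : PySem.Chars.lower (c :: w) = PySem.Chars.lowerChar c :: PySem.Chars.lower w := rfl
      rw [hlc, jadenGo_cons true, jadenGo_cons false, hcb]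
      constructor
      · rw [ih.2]; simp
      · rw [List.cons_append, ih.2]; simp

-- B's list-level value equals jadenGo true
theorem alt_eq_jadenGo (cs : List Char) :
    PySem.Chars.join [' '] ((PySem.Chars.splitOn cs [' ']).map pyCapitalize) = jadenGo true cs := by
  rw [splitOn_eq_sp]
  obtain ⟨w, ws, hw⟩ := sp_cons_exists cs
  have h := (sp_join cs).1
  rw [hw] at h ⊢
  simp only [List.headI, List.tail] at h
  rw [List.map_cons, join_cons, List.map_map, ← h]
  rfl

-- A's loop, once the accumulator is nonempty, emits jadenGo driven by the last emitted char
theorem foldA (cs : List Char) (ans : List Char) (h : ans ≠ []) :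
    cs.foldl
      (fun answer ss =>
        if answer = [] then answer ++ [PySem.Chars.upperChar ss]
        else if PySem.List.pyGetD answer (-1) ' ' = ' ' then answer ++ [PySem.Chars.upperChar ss]
        else answer ++ [PySem.Chars.lowerChar ss]) ans
    = ans ++ jadenGo (PySem.List.pyGetD ans (-1) ' ' == ' ') cs := by
  induction cs generalizing ans with
  | nil => simp [jadenGo]
  | cons c cs ih =>
    set t := if PySem.List.pyGetD ans (-1) ' ' = ' ' then PySem.Chars.upperChar c
             else PySem.Chars.lowerChar c with ht
    have hstep :
        (if ans = [] then ans ++ [PySem.Chars.upperChar c]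
         else if PySem.List.pyGetD ans (-1) ' ' = ' ' then ans ++ [PySem.Chars.upperChar c]
         else ans ++ [PySem.Chars.lowerChar c]) = ans ++ [t] := by
      rw [if_neg h, ht]; split <;> rfl
    rw [List.foldl_cons, hstep, ih (ans ++ [t]) (by simp)]
    have hlast : PySem.List.pyGetD (ans ++ [t]) (-1) ' ' = t :=
      PySem.List.pyGetD_neg_one_append_singleton ans t ' '
    have hts : (t == ' ') = (c == ' ') := by
      rw [ht]
      by_cases hcond : PySem.List.pyGetD ans (-1) ' ' = ' '
      · simp only [if_pos hcond]
        by_cases hc : c = ' ' <;> simp [hc, upperChar_space_iff]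
      · simp only [if_neg hcond]
        by_cases hc : c = ' ' <;> simp [hc, lowerChar_space_iff]
    rw [hlast, hts, jadenGo_cons]
    have hgoif : (if (PySem.List.pyGetD ans (-1) ' ' == ' ') then PySem.Chars.upperChar c
        else PySem.Chars.lowerChar c) = t := by
      rw [ht]
      by_cases hcond : PySem.List.pyGetD ans (-1) ' ' = ' ' <;> simp [hcond]
    rw [hgoif]
    simp

-- A's list-level value equals jadenGo true
theorem a_eq_jadenGo (cs : List Char) :
    cs.foldl
      (fun answer ss =>
        if answer = [] then answer ++ [PySem.Chars.upperChar ss]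
        else if PySem.List.pyGetD answer (-1) ' ' = ' ' then answer ++ [PySem.Chars.upperChar ss]
        else answer ++ [PySem.Chars.lowerChar ss]) []
    = jadenGo true cs := by
  cases cs with
  | nil => simp [jadenGo]
  | cons c cs =>
    rw [List.foldl_cons]
    have hstep :
        (if ([] : List Char) = [] then ([] : List Char) ++ [PySem.Chars.upperChar c]
         else if PySem.List.pyGetD ([] : List Char) (-1) ' ' = ' ' then [] ++ [PySem.Chars.upperChar c]
         else [] ++ [PySem.Chars.lowerChar c]) = [PySem.Chars.upperChar c] := by simp
    rw [hstep, foldA cs [PySem.Chars.upperChar c] (by simp)]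
    have hlast : PySem.List.pyGetD [PySem.Chars.upperChar c] (-1) ' ' = PySem.Chars.upperChar c :=
      PySem.List.pyGetD_neg_one_append_singleton [] (PySem.Chars.upperChar c) ' '
    have hts : (PySem.Chars.upperChar c == ' ') = (c == ' ') := by
      by_cases hc : c = ' ' <;> simp [hc, upperChar_space_iff]
    rw [hlast, hts, jadenGo_cons]
    simp

-- ===== VERDICT (by name: the statement is the Claim_ definition above) =====
theorem solution_spec : Claim_equal_solution := by
  intro s _
  unfold Spec_solution solution solution_alt
  rw [a_eq_jadenGo, alt_eq_jadenGo]
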